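-- pv_equiv track=rewrite | github.com/johnprakashgithub/Learning | python/crackit/second_lowest_score.py | second_lowest
-- ===== SOURCE A (Python) =====
-- def second_lowest(students):
--     results = []
--     if 2 <= len(students) <= 5:
--         low = students[0][1]
--         second = students[1][1]
--         if low > second:
--             results.append(students[0][0])
--             t = low
--             low = second
--             second = t
--         else:
--             results.append(students[1][0])
--         if len(students) == 2:
--             return results
--         else:
--             results = []
--         for i in range(2, len(students)):
--             if students[i][1] < low:
--                 second = low
--                 low = students[i][1]
--             elif low < students[i][1] < second or (low == second and second < students[i][1]):
--                 second = students[i][1]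
--         for student, score in students:
--             if score == second:
--                 results.append(student)
--     return results
-- ===== SOURCE B (Python) =====
-- def second_lowest(students):
--     if not (2 <= len(students) <= 5):
--         return []
--     distinct = sorted({score for _, score in students})
--     target = distinct[1] if len(distinct) >= 2 else distinct[0]
--     return [name for name, score in students if score == target]
-- ===== Notes on version B (the rewrite author's own statement) =====
-- stated objective: simpler
-- what changed: B replaces A's hand-maintained two-variable (low, second) scan and early-return length-2 branch with one uniform rule: sort the distinct scores, take the second one (or the only one) as target, and filter the roster for it.
-- intended difference: On length-2 rosters whose two scores are equal, A's early-return branch returns only the second student's name while B returns both names, which matches A's own behaviour on longer all-tied rosters and is the intended 'all students at the target score' answer. — e.g. on second_lowest([("alice", 3), ("bob", 3)]): A returns ["bob"], B returns ["alice", "bob"]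
import Mathlib
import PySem

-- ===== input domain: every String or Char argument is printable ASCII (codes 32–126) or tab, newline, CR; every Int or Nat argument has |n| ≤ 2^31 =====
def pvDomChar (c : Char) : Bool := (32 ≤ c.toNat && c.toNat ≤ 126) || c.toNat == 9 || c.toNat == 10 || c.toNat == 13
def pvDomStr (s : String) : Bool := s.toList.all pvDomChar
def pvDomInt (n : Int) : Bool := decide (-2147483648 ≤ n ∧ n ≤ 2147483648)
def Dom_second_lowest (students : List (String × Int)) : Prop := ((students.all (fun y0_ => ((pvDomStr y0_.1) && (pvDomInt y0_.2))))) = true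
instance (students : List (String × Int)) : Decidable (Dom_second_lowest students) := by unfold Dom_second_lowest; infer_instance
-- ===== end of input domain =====

-- B replaces A's two-variable scan by sort-distinct-and-filter (objective: simpler); on length-2 ties B returns
-- both names where A returns one — see D_second_lowest below.

-- ===== PORT A =====
def second_lowest (students : List (String × Int)) : List String :=
  if 2 ≤ students.length ∧ students.length ≤ 5 then
    match students with
    | s0 :: s1 :: rest =>
      -- low = students[0][1]; second = students[1][1]; swap-and-append branch
      let st0 : List String × Int × Int :=
        if s0.2 > s1.2 then ([s0.1], s1.2, s0.2) else ([s1.1], s0.2, s1.2)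
      if students.length = 2 then st0.1
      else
        -- for i in range(2, len(students)): the elements students[i] are exactly `rest`
        let fin : Int × Int := rest.foldl
          (fun (p : Int × Int) si =>
            if si.2 < p.1 then (si.2, p.1)
            else if (p.1 < si.2 ∧ si.2 < p.2) ∨ (p.1 = p.2 ∧ p.2 < si.2) then (p.1, si.2)
            else p)
          (st0.2.1, st0.2.2)
        students.foldl (fun res st => if st.2 = fin.2 then res ++ [st.1] else res) []
    | _ => []  -- unreachable: the guard forces length ≥ 2
  else []

-- ===== PORT B =====
def second_lowest_alt (students : List (String × Int)) : List String :=
  if 2 ≤ students.length ∧ students.length ≤ 5 then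
    let distinct := PySem.List.sorted (PySem.Set.ofList (students.map (·.2))) (fun x => x) false
    -- distinct is nonempty (students has ≥ 2 elements), so Python's distinct[0]/distinct[1] cannot raise
    let target := if 2 ≤ distinct.length then PySem.List.pyGetD distinct 1 0
                  else PySem.List.pyGetD distinct 0 0
    (students.filter (fun st => st.2 = target)).map (·.1)
  else []

-- ===== PRECONDITION & SPEC =====
-- On length-2 rosters with equal scores A returns only the second student's name; B returns both names,
-- the intended "all students with the target score" answer (A itself does this on longer all-tied rosters).
def D_second_lowest (students : List (String × Int)) : Prop :=
  students.length = 2 ∧ PySem.List.pyGetD (students.map (·.2)) 0 0 = PySem.List.pyGetD (students.map (·.2)) 1 0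
instance (students : List (String × Int)) : Decidable (D_second_lowest students) := by
  unfold D_second_lowest; infer_instance

def Spec_second_lowest (students : List (String × Int)) (out : List String) : Prop :=
  ¬ D_second_lowest students → out = second_lowest_alt students
instance (students : List (String × Int)) (out : List String) : Decidable (Spec_second_lowest students out) := by
  unfold Spec_second_lowest; infer_instance

def pvDiffWitness_second_lowest : (List (String × Int)) := [("alice", 3), ("bob", 3)]
def pvDiffWitnessOut_second_lowest : (List String) × (List String) := (["bob"], ["alice", "bob"])

-- ===== CLAIM (what is proved, stated in full; the proofs are below) =====
def Claim_unchanged_second_lowest : Prop :=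
  ∀ (students : List (String × Int)), Dom_second_lowest students → Spec_second_lowest students (second_lowest students)
def Claim_changed_second_lowest : Prop :=
  Dom_second_lowest (pvDiffWitness_second_lowest) ∧ D_second_lowest (pvDiffWitness_second_lowest) ∧
  second_lowest (pvDiffWitness_second_lowest) = pvDiffWitnessOut_second_lowest.1 ∧
  second_lowest_alt (pvDiffWitness_second_lowest) = pvDiffWitnessOut_second_lowest.2 ∧
  pvDiffWitnessOut_second_lowest.1 ≠ pvDiffWitnessOut_second_lowest.2
def Claim_exact_second_lowest : Prop :=
  ∀ (students : List (String × Int)), Dom_second_lowest students → D_second_lowest students →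
    second_lowest students ≠ second_lowest_alt students

-- ===== LEMMAS AND PROOFS =====

def LoSec (xs : List Int) (m s : Int) : Prop :=
  m ∈ xs ∧ (∀ y ∈ xs, m ≤ y) ∧
  (((∀ y ∈ xs, y ≤ m) ∧ s = m) ∨ (s ∈ xs ∧ m < s ∧ ∀ y ∈ xs, m < y → s ≤ y))

def stepA (p : Int × Int) (x : Int) : Int × Int :=
  if x < p.1 then (x, p.1)
  else if (p.1 < x ∧ x < p.2) ∨ (p.1 = p.2 ∧ p.2 < x) then (p.1, x)
  else p

theorem LoSec_step (xs : List Int) (m s x : Int) (h : LoSec xs m s) :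
    LoSec (xs ++ [x]) (stepA (m, s) x).1 (stepA (m, s) x).2 := by
  obtain ⟨hm, hmin, hcase⟩ := h
  unfold stepA LoSec
  simp only [List.mem_append, List.mem_singleton]
  split_ifs with h1 h2 <;> dsimp only
  · -- x < m : new (x, m)
    refine ⟨Or.inr rfl, ?_, Or.inr ⟨Or.inl hm, h1, ?_⟩⟩
    · rintro y (hy | rfl)
      · exact le_trans h1.le (hmin y hy)
      · exact le_refl _
    · rintro y (hy | rfl) hxy
      · exact hmin y hy
      · omega
  · -- second := x
    rcases h2 with ⟨hmx, hxs⟩ | ⟨hms, hsx⟩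
    · refine ⟨Or.inl hm, ?_, Or.inr ⟨Or.inr rfl, hmx, ?_⟩⟩
      · rintro y (hy | rfl)
        · exact hmin y hy
        · omega
      · rintro y (hy | rfl) hmy
        · rcases hcase with ⟨hall, _⟩ | ⟨_, _, hsec⟩
          · exact absurd (hall y hy) (by omega)
          · exact le_trans hxs.le (hsec y hy hmy)
        · exact le_refl _
    · subst hms
      refine ⟨Or.inl hm, ?_, Or.inr ⟨Or.inr rfl, hsx, ?_⟩⟩
      · rintro y (hy | rfl)
        · exact hmin y hy
        · omega
      · rintro y (hy | rfl) hmy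
        · rcases hcase with ⟨hall, _⟩ | ⟨_, hlt, _⟩
          · exact absurd (hall y hy) (by omega)
          · omega
        · exact le_refl _
  · -- unchanged
    refine ⟨Or.inl hm, ?_, ?_⟩
    · rintro y (hy | rfl)
      · exact hmin y hy
      · omega
    rcases hcase with ⟨hall, rfl⟩ | ⟨hs, hlt, hsec⟩
    · left
      refine ⟨?_, rfl⟩
      rintro y (hy | rfl)
      · exact hall y hy
      · by_contra hx
        exact h2 (Or.inr ⟨rfl, by omega⟩)
    · right
      refine ⟨Or.inl hs, hlt, ?_⟩
      rintro y (hy | rfl) hmy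
      · exact hsec y hy hmy
      · by_contra hx
        exact h2 (Or.inl ⟨hmy, by omega⟩)

theorem LoSec_init (a b : Int) :
    LoSec [a, b] (if a > b then b else a) (if a > b then a else b) := by
  unfold LoSec
  split_ifs with h
  · refine ⟨by simp, ?_, Or.inr ⟨by simp, h, ?_⟩⟩
    · intro y hy; simp at hy; rcases hy with rfl | rfl <;> omega
    · intro y hy; simp at hy; rcases hy with rfl | rfl <;> omega
  · rcases eq_or_lt_of_le (not_lt.mp h) with heq | hlt
    · refine ⟨by simp, ?_, Or.inl ⟨?_, heq.symm⟩⟩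
      · intro y hy; simp at hy; rcases hy with rfl | rfl <;> omega
      · intro y hy; simp at hy; rcases hy with rfl | rfl <;> omega
    · refine ⟨by simp, ?_, Or.inr ⟨by simp, hlt, ?_⟩⟩
      · intro y hy; simp at hy; rcases hy with rfl | rfl <;> omega
      · intro y hy; simp at hy; rcases hy with rfl | rfl <;> omega

theorem LoSec_foldl (l : List Int) : ∀ (xs : List Int) (m s : Int), LoSec xs m s →
    LoSec (xs ++ l) (l.foldl stepA (m, s)).1 (l.foldl stepA (m, s)).2 := by
  induction l with
  | nil => intro xs m s h; simpa using h
  | cons x t ih =>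
    intro xs m s h
    have h1 := LoSec_step xs m s x h
    have h2 := ih (xs ++ [x]) (stepA (m, s) x).1 (stepA (m, s) x).2 h1
    simpa [List.append_assoc] using h2

theorem LoSec_unique (xs : List Int) (m s m' s' : Int)
    (h : LoSec xs m s) (h' : LoSec xs m' s') : m = m' ∧ s = s' := by
  obtain ⟨hm, hmin, hc⟩ := h
  obtain ⟨hm', hmin', hc'⟩ := h'
  have hmm : m = m' := le_antisymm (hmin m' hm') (hmin' m hm)
  subst hmm
  refine ⟨rfl, ?_⟩
  rcases hc with ⟨hall, rfl⟩ | ⟨hs, hlt, hsec⟩ <;>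
    rcases hc' with ⟨hall', rfl⟩ | ⟨hs', hlt', hsec'⟩
  · rfl
  · exact absurd (hall s' hs') (by omega)
  · exact absurd (hall' s hs) (by omega)
  · exact le_antisymm (hsec s' hs' hlt') (hsec' s hs hlt)

theorem LoSec_target (xs : List Int) (hne : xs ≠ []) :
    LoSec xs
      (PySem.List.pyGetD (PySem.List.sorted (PySem.Set.ofList xs) (fun x => x) false) 0 0)
      (if 2 ≤ (PySem.List.sorted (PySem.Set.ofList xs) (fun x => x) false).length
       then PySem.List.pyGetD (PySem.List.sorted (PySem.Set.ofList xs) (fun x => x) false) 1 0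
       else PySem.List.pyGetD (PySem.List.sorted (PySem.Set.ofList xs) (fun x => x) false) 0 0) := by
  set d := PySem.List.sorted (PySem.Set.ofList xs) (fun x => x) false with hd
  have hmem : ∀ y : Int, y ∈ d ↔ y ∈ xs := by
    intro y; rw [hd, PySem.List.mem_sorted, PySem.Set.mem_ofList]
  have hpw : d.Pairwise (· < ·) := by rw [hd]; exact PySem.List.sorted_ofList_pairwise_lt xs
  have hdne : d ≠ [] := by
    intro h0
    obtain ⟨y, hy⟩ := List.exists_mem_of_ne_nil xs hne
    have := (hmem y).mpr hy
    simp [h0] at this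
  match hdm : d with
  | [] => exact absurd rfl hdne
  | [m0] =>
    have hall : ∀ y ∈ xs, y = m0 := by
      intro y hy
      have := (hmem y).mpr hy; simpa using this
    have hm0 : m0 ∈ xs := (hmem m0).mp (by simp)
    simp only [List.length_cons, List.length_nil]
    norm_num
    unfold LoSec
    refine ⟨hm0, ?_, Or.inl ⟨?_, rfl⟩⟩ <;> intro y hy <;> simp [hall y hy]
  | m0 :: s0 :: t =>
    have hms : m0 < s0 := (List.pairwise_cons.mp hpw).1 s0 (by simp)
    have hm0 : m0 ∈ xs := (hmem m0).mp (by simp)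
    have hs0 : s0 ∈ xs := (hmem s0).mp (by simp)
    have hminall : ∀ y ∈ xs, m0 ≤ y := by
      intro y hy
      have hyd := (hmem y).mpr hy
      rcases List.mem_cons.mp hyd with rfl | hyd'
      · exact le_refl _
      · exact ((List.pairwise_cons.mp hpw).1 y hyd').le
    have hsecall : ∀ y ∈ xs, m0 < y → s0 ≤ y := by
      intro y hy hmy
      have hyd := (hmem y).mpr hy
      rcases List.mem_cons.mp hyd with rfl | hyd'
      · omega
      rcases List.mem_cons.mp hyd' with rfl | hyd''
      · exact le_refl _
      · exact ((List.pairwise_cons.mp (List.pairwise_cons.mp hpw).2).1 y hyd'').le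
    simp only [List.length_cons]
    rw [if_pos (by omega)]
    have hg0 : PySem.List.pyGetD (m0 :: s0 :: t) 0 0 = m0 := by simp [PySem.List.pyGetD_ofNat']
    have hg1 : PySem.List.pyGetD (m0 :: s0 :: t) 1 0 = s0 := by simp [PySem.List.pyGetD_ofNat']
    rw [hg0, hg1]
    exact ⟨hm0, hminall, Or.inr ⟨hs0, hms, hsecall⟩⟩

theorem main (students : List (String × Int)) (hD : ¬ D_second_lowest students) :
    second_lowest students = second_lowest_alt students := by
  unfold second_lowest second_lowest_alt
  by_cases hg : 2 ≤ students.length ∧ students.length ≤ 5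
  · rw [if_pos hg, if_pos hg]
    match students, hg, hD with
    | s0 :: s1 :: rest, hg, hD =>
      simp only []
      set scores := ((s0 :: s1 :: rest).map (·.2)) with hscores
      have hsc : scores = s0.2 :: s1.2 :: rest.map (·.2) := by simp [hscores]
      have htgt := LoSec_target scores (by simp [hsc])
      set target := (if 2 ≤ (PySem.List.sorted (PySem.Set.ofList scores) (fun x => x) false).length
        then PySem.List.pyGetD (PySem.List.sorted (PySem.Set.ofList scores) (fun x => x) false) 1 0
        else PySem.List.pyGetD (PySem.List.sorted (PySem.Set.ofList scores) (fun x => x) false) 0 0) with htarget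
      by_cases h2 : (s0 :: s1 :: rest).length = 2
      · -- rest = [], and ¬D gives s0.2 ≠ s1.2
        have hrest : rest = [] := by simpa using h2
        subst hrest
        have hne : s0.2 ≠ s1.2 := by
          intro h
          exact hD ⟨rfl, by simp [PySem.List.pyGetD_ofNat', h]⟩
        rw [if_pos h2]
        have hinit := LoSec_init s0.2 s1.2
        have huniq := LoSec_unique [s0.2, s1.2] _ _ _ _ hinit (by rw [hsc] at htgt; simpa using htgt)
        have htv : target = (if s0.2 > s1.2 then s0.2 else s1.2) := huniq.2.symm
        by_cases hab : s0.2 > s1.2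
        · rw [if_pos hab] at htv ⊢
          simp [List.filter, htv, Ne.symm hne]
        · rw [if_neg hab] at htv ⊢
          simp [List.filter, htv, hne]
      · rw [if_neg h2]
        have hfold : ∀ (init : Int × Int), rest.foldl
            (fun (p : Int × Int) si =>
              if si.2 < p.1 then (si.2, p.1)
              else if (p.1 < si.2 ∧ si.2 < p.2) ∨ (p.1 = p.2 ∧ p.2 < si.2) then (p.1, si.2)
              else p) init = (rest.map (·.2)).foldl stepA init := by
          intro init; rw [List.foldl_map]; rfl
        by_cases hab : s0.2 > s1.2
        · rw [if_pos hab]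
          simp only [hfold]
          have hinit : LoSec [s0.2, s1.2] s1.2 s0.2 := by
            have := LoSec_init s0.2 s1.2; rw [if_pos hab, if_pos hab] at this; exact this
          have hls := LoSec_foldl (rest.map (·.2)) [s0.2, s1.2] s1.2 s0.2 hinit
          have hfin : LoSec scores ((rest.map (·.2)).foldl stepA (s1.2, s0.2)).1
              ((rest.map (·.2)).foldl stepA (s1.2, s0.2)).2 := by
            rw [hsc]; simpa using hls
          have hsec2 := (LoSec_unique scores _ _ _ _ hfin htgt).2
          rw [hsec2, PySem.List.foldl_append_ite]
          simp
        · rw [if_neg hab]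
          simp only [hfold]
          have hinit : LoSec [s0.2, s1.2] s0.2 s1.2 := by
            have := LoSec_init s0.2 s1.2; rw [if_neg hab, if_neg hab] at this; exact this
          have hls := LoSec_foldl (rest.map (·.2)) [s0.2, s1.2] s0.2 s1.2 hinit
          have hfin : LoSec scores ((rest.map (·.2)).foldl stepA (s0.2, s1.2)).1
              ((rest.map (·.2)).foldl stepA (s0.2, s1.2)).2 := by
            rw [hsc]; simpa using hls
          have hsec2 := (LoSec_unique scores _ _ _ _ hfin htgt).2
          rw [hsec2, PySem.List.foldl_append_ite]
          simp
  · rw [if_neg hg, if_neg hg]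


theorem tight (students : List (String × Int)) (hD : D_second_lowest students) :
    second_lowest students ≠ second_lowest_alt students := by
  obtain ⟨hlen, heq⟩ := hD
  match students, hlen with
  | [s0, s1], _ =>
    have ha : s0.2 = s1.2 := by simpa [PySem.List.pyGetD_ofNat'] using heq
    have hof : PySem.Set.ofList [s0.2, s1.2] = [s1.2] := by
      simp [PySem.Set.ofList, PySem.Set.add, ha]
    have hsort := PySem.List.sorted_eq_self_of_pairwise (xs := [s1.2]) (fun x => x)
      (List.pairwise_singleton _ _)
    have htv : PySem.List.pyGetD [s1.2] 0 0 = s1.2 := by simp [PySem.List.pyGetD_ofNat']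
    unfold second_lowest second_lowest_alt
    simp only [List.length_cons, List.length_nil, List.map_cons, List.map_nil]
    rw [hof, hsort]
    norm_num [htv]
    rw [if_neg (show ¬ s0.2 > s1.2 by omega)]
    simp [List.filter, ha]

-- ===== VERDICT (by name: the statement is the Claim_ definition above) =====
theorem second_lowest_spec : Claim_unchanged_second_lowest := by
  intro students _ hD
  exact main students hD

theorem second_lowest_changed : Claim_changed_second_lowest := by
  unfold Claim_changed_second_lowest; decide

theorem second_lowest_tight : Claim_exact_second_lowest := by
  intro students _ hD
  exact tight students hD
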